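-- pv_equiv track=rewrite | github.com/JuHyang/Algorithm-Study | Backjoon/python/tdst.py | solution
-- ===== SOURCE A (Python) =====
-- def solution(m, n, board):
--     list_board = []
--
--     answer = 0
--
--     for i in range(m):
--         list_temp = []
--         for j in range(n):
--             list_temp.append(board[i][j])
--         list_board.append(list_temp)
--     while True:
--         list_remove = []
--         for i in range(m - 1):
--             for j in range(n - 1):
--                 if list_board[i][j] == list_board[i + 1][j] == list_board[i][j + 1] == list_board[i + 1][j + 1] != 'O':
--                     list_remove.append((i, j))
--                     list_remove.append((i + 1, j))
--                     list_remove.append((i, j + 1))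
--                     list_remove.append((i + 1, j + 1))
--         for i, j in list_remove:
--             if list_board[i][j] != 'O':
--                 list_board[i][j] = 'O'
--                 answer += 1
--
--         for i in range(2, m + 1):
--             for j in range(n):
--                 if list_board[m - i][j] != 'O' and list_board[m - i + 1][j] == 'O':
--                     a = m - i
--                     while True :
--
--                         if a == m - 1 :
--                             break
--                         if list_board[a + 1][j] != 'O' :
--                             break
--                         list_board[a + 1][j] = list_board[a][j]
--                         list_board[a][j] = 'O'
--                         a += 1
--
--         for i in list_board :
--             print (i)
--         print ()
--         if len(list_remove) == 0:
--             break
--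
--     return answer
-- ===== SOURCE B (Python) =====
-- def solution(m, n, board):
--     # Rebuild-based simulation: each round, collect the top-left corners of all
--     # uniform non-'O' 2x2 blocks, take the SET of covered cells, count it, and
--     # rebuild the board immutably with per-column compaction (gravity) in one pass.
--     # Return value only: A additionally prints every intermediate state; B does not.
--     grid = [[board[i][j] for j in range(n)] for i in range(m)]
--     answer = 0
--     while True:
--         hits = [(i, j) for i in range(m - 1) for j in range(n - 1)
--                 if grid[i][j] == grid[i + 1][j]
--                 and grid[i + 1][j] == grid[i][j + 1]
--                 and grid[i][j + 1] == grid[i + 1][j + 1]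
--                 and grid[i + 1][j + 1] != 'O']
--         if not hits:
--             return answer
--         doomed = {c for (i, j) in hits
--                   for c in ((i, j), (i + 1, j), (i, j + 1), (i + 1, j + 1))}
--         answer += len(doomed)
--         cleared = [['O' if (i, j) in doomed else ch for j, ch in enumerate(row)]
--                    for i, row in enumerate(grid)]
--         kept = [[cleared[i][j] for i in range(m) if cleared[i][j] != 'O']
--                 for j in range(n)]
--         grid = [['O' if i < m - len(kept[j]) else kept[j][i - (m - len(kept[j]))]
--                  for j in range(n)] for i in range(m)]
-- ===== Notes on version B (the rewrite author's own statement) =====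
-- stated objective: alternative
-- what changed: B replaces A's in-place mutation rounds by an immutable rebuild: the doomed cells become a set whose size is added to the answer (instead of A's per-cell re-check-and-count loop), and gravity is one collect-and-place compaction per column (instead of A's per-cell bubble-down inner while loop); B also drops A's debug printing of every intermediate board.
import Mathlib
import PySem

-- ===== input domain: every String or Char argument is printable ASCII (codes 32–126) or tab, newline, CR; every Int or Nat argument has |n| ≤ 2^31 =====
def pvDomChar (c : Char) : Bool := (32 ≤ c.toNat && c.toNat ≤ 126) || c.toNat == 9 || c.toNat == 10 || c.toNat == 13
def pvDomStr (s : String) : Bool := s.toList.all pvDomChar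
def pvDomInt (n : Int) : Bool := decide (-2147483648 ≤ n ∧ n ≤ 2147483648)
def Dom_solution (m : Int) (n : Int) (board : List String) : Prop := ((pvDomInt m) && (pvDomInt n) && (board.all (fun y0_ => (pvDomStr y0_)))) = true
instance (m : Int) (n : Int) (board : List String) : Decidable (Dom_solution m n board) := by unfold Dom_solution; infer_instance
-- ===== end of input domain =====

-- B replaces A's in-place marking loop and per-cell bubble gravity by an immutable rebuild:
-- a SET of doomed cells (counted by its size) and one collect-and-place compaction per column.
-- Equivalence is about the RETURN value only: A prints every intermediate board, B prints nothing.

-- ===== PORT A =====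
-- cell read/write of 'list_board[i][j]' (indices are always in range where these are used;
-- the defaults are unreachable under Pre_solution)
def pvGet (g : List (List Char)) (i j : Nat) : Char := (g.getD i []).getD j 'O'
def pvSet (g : List (List Char)) (i j : Nat) (c : Char) : List (List Char) :=
  g.modify i (fun row => row.set j c)

-- the double loop filling 'list_remove' (4 appends per matched 2x2 block)
def pvA_detect (g : List (List Char)) (m n : Int) : List (Nat × Nat) :=
  (List.range (m - 1).toNat).foldl (fun acc i =>
    (List.range (n - 1).toNat).foldl (fun acc j =>
      if pvGet g i j = pvGet g (i+1) j ∧ pvGet g (i+1) j = pvGet g i (j+1) ∧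
         pvGet g i (j+1) = pvGet g (i+1) (j+1) ∧ pvGet g (i+1) (j+1) ≠ 'O'
      then acc ++ [(i, j), (i+1, j), (i, j+1), (i+1, j+1)] else acc) acc) []

-- 'for i, j in list_remove: …' marking pass carrying (list_board, answer)
def pvA_mark (g : List (List Char)) (l : List (Nat × Nat)) (ans : Int) :
    List (List Char) × Int :=
  l.foldl (fun p pr =>
    if pvGet p.1 pr.1 pr.2 ≠ 'O' then (pvSet p.1 pr.1 pr.2 'O', p.2 + 1) else p) (g, ans)

-- the inner 'while True' of the gravity pass; fuel = (m-1) - a, so fuel 0 ⟺ 'a == m - 1'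
def pvA_fall : Nat → List (List Char) → Nat → Nat → List (List Char)
  | 0, g, _, _ => g
  | fuel+1, g, j, a =>
      if pvGet g (a+1) j ≠ 'O' then g
      else pvA_fall fuel (pvSet (pvSet g (a+1) j (pvGet g a j)) a j 'O') j (a+1)

-- 'for i in range(2, m+1): for j in range(n): …' (row m - i for i = k + 2)
def pvA_grav (g : List (List Char)) (m n : Int) : List (List Char) :=
  (List.range (m - 1).toNat).foldl (fun g k =>
    (List.range n.toNat).foldl (fun g j =>
      if pvGet g (m.toNat - (k + 2)) j ≠ 'O' ∧ pvGet g (m.toNat - (k + 2) + 1) j = 'O'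
      then pvA_fall (m.toNat - 1 - (m.toNat - (k + 2))) g j (m.toNat - (k + 2)) else g) g) g

-- the outer 'while True'; fuel m*n+1 suffices: a round with non-empty list_remove clears ≥ 1 cell
def pvA_loop : Nat → List (List Char) → Int → Int → Int → Int
  | 0, _, _, _, ans => ans
  | fuel+1, g, m, n, ans =>
      let l := pvA_detect g m n
      let p := pvA_mark g l ans
      let g3 := pvA_grav p.1 m n
      if l.length = 0 then p.2 else pvA_loop fuel g3 m n p.2

def solution (m : Int) (n : Int) (board : List String) : Int :=
  -- building 'list_board' by appends; board[i][j] has i, j ≥ 0, in range under Pre_solution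
  let g := (List.range m.toNat).foldl (fun acc i =>
    acc ++ [(List.range n.toNat).foldl (fun row j =>
      row ++ [(board.getD i "").toList.getD j 'O']) []]) []
  pvA_loop (m.toNat * n.toNat + 1) g m n 0

-- ===== PORT B =====
-- 'hits': top-left corners of uniform non-'O' 2x2 blocks (a list comprehension)
def pvB_hits (g : List (List Char)) (m n : Int) : List (Nat × Nat) :=
  (List.range (m - 1).toNat).flatMap (fun i =>
    (List.range (n - 1).toNat).filterMap (fun j =>
      if pvGet g i j = pvGet g (i+1) j ∧ pvGet g (i+1) j = pvGet g i (j+1) ∧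
         pvGet g i (j+1) = pvGet g (i+1) (j+1) ∧ pvGet g (i+1) (j+1) ≠ 'O'
      then some (i, j) else none))

-- the four cells covered by the block at (i, j)
def pvB_blk (p : Nat × Nat) : List (Nat × Nat) :=
  [(p.1, p.2), (p.1 + 1, p.2), (p.1, p.2 + 1), (p.1 + 1, p.2 + 1)]

-- one round of B: doomed set, cleared board, per-column kept cells, rebuilt board
def pvB_step (g : List (List Char)) (m n : Int) (hits : List (Nat × Nat)) :
    List (List Char) × Int :=
  let doomed : PySem.Set (Nat × Nat) := PySem.Set.ofList (hits.flatMap pvB_blk)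
  let cleared := (List.range m.toNat).map (fun i => (List.range n.toNat).map (fun j =>
      if PySem.Set.contains doomed (i, j) then 'O' else pvGet g i j))
  let kept := (List.range n.toNat).map (fun j =>
      (List.range m.toNat).filterMap (fun i =>
        if pvGet cleared i j ≠ 'O' then some (pvGet cleared i j) else none))
  let g' := (List.range m.toNat).map (fun i => (List.range n.toNat).map (fun j =>
      if i < m.toNat - (kept.getD j []).length then 'O'
      else (kept.getD j []).getD (i - (m.toNat - (kept.getD j []).length)) 'O'))
  (g', PySem.Set.len doomed)

-- 'while True' of B, same fuel bound as A's port
def pvB_loop : Nat → List (List Char) → Int → Int → Int → Int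
  | 0, _, _, _, ans => ans
  | fuel+1, g, m, n, ans =>
      let hits := pvB_hits g m n
      if hits = [] then ans
      else
        let p := pvB_step g m n hits
        pvB_loop fuel p.1 m n (ans + p.2)

def solution_alt (m : Int) (n : Int) (board : List String) : Int :=
  let g := (List.range m.toNat).map (fun i => (List.range n.toNat).map (fun j =>
      (board.getD i "").toList.getD j 'O'))
  pvB_loop (m.toNat * n.toNat + 1) g m n 0

-- ===== PRECONDITION & SPEC =====
-- exactly where Python A returns: board[i][j] is evaluated for 0 ≤ i < m, 0 ≤ j < n only,
-- so A raises IndexError iff m > 0 and n > 0 and some accessed row is missing or too short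
def Pre_solution (m : Int) (n : Int) (board : List String) : Prop :=
  0 < m → 0 < n →
    (m ≤ (board.length : Int) ∧ ∀ s ∈ board.take m.toNat, n ≤ (s.length : Int))
instance (m : Int) (n : Int) (board : List String) : Decidable (Pre_solution m n board) := by
  unfold Pre_solution; infer_instance
def pvWitness_solution : Int × Int × List String := (2, 2, ["AA", "AA"])

def Spec_solution (m : Int) (n : Int) (board : List String) (out : Int) : Prop := out = solution_alt m n board
instance (m : Int) (n : Int) (board : List String) (out : Int) : Decidable (Spec_solution m n board out) := by unfold Spec_solution; infer_instance

-- ===== CLAIM (what is proved, stated in full; the proofs are below) =====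
def Claim_equal_solution : Prop := ∀ (m : Int) (n : Int) (board : List String), Dom_solution m n board → Pre_solution m n board → Spec_solution m n board (solution m n board)

-- ===== LEMMAS AND PROOFS =====

-- rectangular shape invariant (index-based), and the column view of the grid
def RectI (M N : Nat) (g : List (List Char)) : Prop :=
  g.length = M ∧ ∀ i < M, ((g.getD i []).length = N)
def pvCol (g : List (List Char)) (j : Nat) : List Char := g.map (fun row => row.getD j 'O')

theorem pvGet_col (g : List (List Char)) (i j : Nat) :
    pvGet g i j = (pvCol g j).getD i 'O' := by
  simp only [pvGet, pvCol, List.getD_eq_getElem?_getD, List.getElem?_map]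
  cases h : g[i]? <;> simp

theorem length_pvCol (g : List (List Char)) (j : Nat) : (pvCol g j).length = g.length := by
  simp [pvCol]

theorem getD_pvSet (g : List (List Char)) (i j : Nat) (c : Char) (i' : Nat) :
    (pvSet g i j c).getD i' [] = if i = i' then (g.getD i' []).set j c else g.getD i' [] := by
  simp only [pvSet, List.getD_eq_getElem?_getD, List.getElem?_modify]
  split_ifs with h
  · cases hg : g[i']? <;> simp [h]
  · cases hg : g[i']? <;> simp [h]

theorem RectI_pvSet {M N : Nat} {g : List (List Char)} (h : RectI M N g) (i j : Nat) (c : Char) :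
    RectI M N (pvSet g i j c) := by
  obtain ⟨h1, h2⟩ := h
  refine ⟨by simp [pvSet, h1], fun i' hi' => ?_⟩
  rw [getD_pvSet]
  split_ifs with hh
  · rw [List.length_set]; exact h2 i' hi'
  · exact h2 i' hi'

theorem pvGet_pvSet (g : List (List Char)) (i j : Nat) (c : Char) (i' j' : Nat) :
    pvGet (pvSet g i j c) i' j' =
      if i = i' ∧ j = j' ∧ i < g.length ∧ j < (g.getD i []).length then c
      else pvGet g i' j' := by
  have hjlen_imp : ∀ h2 : j < (g.getD i []).length, i < g.length := by
    intro h2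
    by_contra h3
    push_neg at h3
    rw [List.getD_eq_default _ _ (by simpa using h3)] at h2
    simp at h2
  simp only [pvGet, getD_pvSet]
  rcases eq_or_ne i i' with hi | hi
  · subst hi
    rw [if_pos rfl]
    rcases eq_or_ne j j' with hj | hj
    · subst hj
      by_cases hb : j < (g.getD i []).length
      · rw [if_pos ⟨rfl, rfl, hjlen_imp hb, hb⟩,
            List.getD_eq_getElem?_getD, List.getElem?_set, if_pos rfl, if_pos hb]
        simp
      · rw [if_neg (by tauto), List.getD_eq_getElem?_getD, List.getElem?_set, if_pos rfl,
            if_neg hb, List.getD_eq_default _ _ (Nat.le_of_not_lt hb)]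
        simp
    · rw [if_neg (by tauto), List.getD_eq_getElem?_getD, List.getElem?_set, if_neg hj,
          ← List.getD_eq_getElem?_getD]
  · rw [if_neg hi, if_neg (by tauto)]

theorem pvGetD_set_ne {j j' : Nat} (l : List Char) (c d : Char) (h : j ≠ j') :
    (l.set j c).getD j' d = l.getD j' d := by
  simp [List.getD_eq_getElem?_getD, List.getElem?_set, h]

theorem pvGetD_set_self {j : Nat} (l : List Char) (c d : Char) (h : j < l.length) :
    (l.set j c).getD j d = c := by
  simp [List.getD_eq_getElem?_getD, List.getElem?_set, h]

theorem pvGetD_eq_getElem (g : List (List Char)) {k : Nat} (h : k < g.length) :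
    g.getD k [] = g[k] := by
  simp [List.getD_eq_getElem?_getD, List.getElem?_eq_getElem h]

theorem pvCol_pvSet_ne {j j' : Nat} (g : List (List Char)) (i : Nat) (c : Char) (h : j ≠ j') :
    pvCol (pvSet g i j c) j' = pvCol g j' := by
  apply List.ext_getElem (by simp [pvSet, pvCol])
  intro k h1 h2
  simp only [pvCol, List.getElem_map, pvSet, List.getElem_modify]
  split_ifs with hik
  · exact pvGetD_set_ne _ _ _ h
  · rfl

theorem pvCol_pvSet_self {M N : Nat} {g : List (List Char)} (hR : RectI M N g)
    {i j : Nat} (hi : i < M) (hj : j < N) (c : Char) :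
    pvCol (pvSet g i j c) j = (pvCol g j).set i c := by
  obtain ⟨hL, hRow⟩ := hR
  apply List.ext_getElem (by simp [pvSet, pvCol])
  intro k h1 h2
  have hk : k < g.length := by simpa [pvSet, pvCol] using h1
  rw [List.getElem_set]
  simp only [pvCol, List.getElem_map, pvSet, List.getElem_modify]
  split_ifs with hik
  · subst hik
    apply pvGetD_set_self
    rw [← pvGetD_eq_getElem g hk, hRow _ (by omega)]
    omega
  · rfl

def sinkC : Nat → List Char → Nat → List Char
  | 0, c, _ => c
  | fuel+1, c, a =>
      if c.getD (a+1) 'O' ≠ 'O' then c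
      else sinkC fuel ((c.set (a+1) (c.getD a 'O')).set a 'O') (a+1)

theorem fall_col {M N : Nat} : ∀ (fuel : Nat) (g : List (List Char)) (j a : Nat),
    RectI M N g → j < N → a + fuel < M →
    pvCol (pvA_fall fuel g j a) j = sinkC fuel (pvCol g j) a
    ∧ (∀ j', j ≠ j' → pvCol (pvA_fall fuel g j a) j' = pvCol g j')
    ∧ RectI M N (pvA_fall fuel g j a) := by
  intro fuel
  induction fuel with
  | zero => intro g j a hR hj ha; exact ⟨rfl, fun _ _ => rfl, hR⟩
  | succ fuel ih =>
    intro g j a hR hj ha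
    rw [pvA_fall, sinkC, ← pvGet_col]
    split_ifs with hguard
    · exact ⟨rfl, fun _ _ => rfl, hR⟩
    · have hR1 : RectI M N (pvSet g (a+1) j (pvGet g a j)) := RectI_pvSet hR _ _ _
      have hR2 : RectI M N (pvSet (pvSet g (a+1) j (pvGet g a j)) a j 'O') := RectI_pvSet hR1 _ _ _
      have hcol2 : pvCol (pvSet (pvSet g (a+1) j (pvGet g a j)) a j 'O') j
          = ((pvCol g j).set (a+1) ((pvCol g j).getD a 'O')).set a 'O' := by
        rw [pvCol_pvSet_self hR1 (by omega) hj, pvCol_pvSet_self hR (by omega) hj, pvGet_col]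
      obtain ⟨c1, c2, c3⟩ := ih _ j (a+1) hR2 hj (by omega)
      refine ⟨?_, ?_, c3⟩
      · rw [c1, hcol2]
      · intro j' hj'
        rw [c2 j' hj', pvCol_pvSet_ne _ _ _ hj', pvCol_pvSet_ne _ _ _ hj']

def stepAt (M r : Nat) (g : List (List Char)) (j : Nat) : List (List Char) :=
  if pvGet g r j ≠ 'O' ∧ pvGet g (r+1) j = 'O' then pvA_fall (M - 1 - r) g j r else g

def stepC (M : Nat) (c : List Char) (r : Nat) : List Char :=
  if c.getD r 'O' ≠ 'O' ∧ c.getD (r+1) 'O' = 'O' then sinkC (M - 1 - r) c r else c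

def gravC (M : Nat) (c : List Char) : List Char :=
  (List.range (M - 1)).foldl (fun c k => stepC M c (M - (k + 2))) c

theorem stepAt_col {M N : Nat} {g : List (List Char)} {j r : Nat}
    (hR : RectI M N g) (hj : j < N) (hr : r + 1 < M) :
    pvCol (stepAt M r g j) j = stepC M (pvCol g j) r
    ∧ (∀ j', j ≠ j' → pvCol (stepAt M r g j) j' = pvCol g j')
    ∧ RectI M N (stepAt M r g j) := by
  rw [stepAt, stepC, ← pvGet_col, ← pvGet_col]
  split_ifs with h
  · exact fall_col (M - 1 - r) g j r hR hj (by omega)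
  · exact ⟨rfl, fun _ _ => rfl, hR⟩

theorem inner_col {M N : Nat} {r : Nat} (hr : r + 1 < M) :
    ∀ (js : List Nat) (g : List (List Char)), (∀ j ∈ js, j < N) → js.Nodup → RectI M N g →
    (∀ j, pvCol (js.foldl (stepAt M r) g) j =
      if j ∈ js then stepC M (pvCol g j) r else pvCol g j)
    ∧ RectI M N (js.foldl (stepAt M r) g) := by
  intro js
  induction js with
  | nil => intro g _ _ hR; exact ⟨fun j => by simp, hR⟩
  | cons j0 rest ih =>
    intro g hjs hnd hR
    obtain ⟨s1, s2, s3⟩ := stepAt_col hR (hjs j0 (by simp)) hr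
    obtain ⟨i1, i2⟩ := ih (stepAt M r g j0) (fun j hj => hjs j (by simp [hj]))
      (List.Nodup.of_cons hnd) s3
    refine ⟨fun j => ?_, by simpa using i2⟩
    rw [List.foldl_cons, i1 j]
    by_cases hmem : j ∈ rest
    · have hne : j0 ≠ j := fun he => (List.nodup_cons.mp hnd).1 (he ▸ hmem)
      rw [if_pos hmem, if_pos (by simp [hmem]), s2 j hne]
    · rw [if_neg hmem]
      rcases eq_or_ne j0 j with he | hne
      · subst he; rw [if_pos (by simp), s1]
      · rw [if_neg (by simp only [List.mem_cons]; push_neg; exact ⟨fun h => hne h.symm, hmem⟩), s2 j hne]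

theorem outer_col {M N : Nat} :
    ∀ (ks : List Nat) (g : List (List Char)), (∀ k ∈ ks, k + 2 ≤ M) → RectI M N g →
    (∀ j, j < N → pvCol (ks.foldl (fun g k => (List.range N).foldl (stepAt M (M - (k+2))) g) g) j
        = ks.foldl (fun c k => stepC M c (M - (k + 2))) (pvCol g j))
    ∧ RectI M N (ks.foldl (fun g k => (List.range N).foldl (stepAt M (M - (k+2))) g) g) := by
  intro ks
  induction ks with
  | nil => intro g _ hR; exact ⟨fun j _ => rfl, hR⟩
  | cons k0 rest ih =>
    intro g hks hR
    have hk0 : k0 + 2 ≤ M := hks k0 (by simp)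
    have hr : (M - (k0 + 2)) + 1 < M := by omega
    obtain ⟨i1, i2⟩ := inner_col hr (List.range N) g (fun j hj => List.mem_range.mp hj)
      (List.nodup_range) hR
    obtain ⟨o1, o2⟩ := ih _ (fun k hk => hks k (by simp [hk])) i2
    refine ⟨fun j hj => ?_, by simpa using o2⟩
    simp only [List.foldl_cons]
    rw [o1 j hj, i1 j, if_pos (List.mem_range.mpr hj)]

def compactSeg (s : List Char) : List Char :=
  List.replicate (s.length - (s.filter (· ≠ 'O')).length) 'O' ++ s.filter (· ≠ 'O')

theorem compactSeg_cons_O (tail : List Char) :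
    compactSeg ('O' :: tail) = 'O' :: compactSeg tail := by
  have := List.length_filter_le (fun c => decide (c ≠ 'O')) tail
  simp only [compactSeg, List.filter_cons]
  rw [if_neg (by simp)]
  simp only [List.length_cons]
  rw [show tail.length + 1 - (tail.filter (· ≠ 'O')).length
      = (tail.length - (tail.filter (· ≠ 'O')).length) + 1 by omega]
  simp [List.replicate_succ]

theorem compactSeg_cons_ne {x : Char} (tail : List Char) (hx : x ≠ 'O') :
    compactSeg (x :: tail) =
      List.replicate (tail.length - (tail.filter (· ≠ 'O')).length) 'O'
        ++ x :: tail.filter (· ≠ 'O') := by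
  have hf : (x :: tail).filter (· ≠ 'O') = x :: tail.filter (· ≠ 'O') := by
    rw [List.filter_cons, if_pos (by simpa using hx)]
  simp only [compactSeg, hf, List.length_cons]
  rw [show tail.length + 1 - (tail.filter (· ≠ 'O')).length.succ
      = tail.length - (tail.filter (· ≠ 'O')).length from by omega]

theorem sink_lemma {M : Nat} : ∀ (p : Nat) (u kept : List Char) (x : Char),
    x ≠ 'O' → (∀ y ∈ kept, y ≠ 'O') → u.length + 1 + p + kept.length = M →
    sinkC (M - 1 - u.length) (u ++ x :: (List.replicate p 'O' ++ kept)) u.length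
      = u ++ (List.replicate p 'O' ++ x :: kept) := by
  intro p
  induction p with
  | zero =>
    intro u kept x hx hk hlen
    simp only [List.replicate_zero, List.nil_append]
    cases kept with
    | nil =>
      have : M - 1 - u.length = 0 := by simp at hlen; omega
      rw [this, sinkC]
    | cons y k' =>
      have hfuel : M - 1 - u.length = k'.length + 1 := by simp at hlen; omega
      rw [hfuel, sinkC]
      rw [if_pos ?_]
      rw [List.getD_append_right _ _ _ _ (by omega),
          show u.length + 1 - u.length = 1 by omega]
      simpa using hk y (by simp)
  | succ p ih =>
    intro u kept x hx hk hlen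
    have hfuel : M - 1 - u.length = (p + kept.length) + 1 := by omega
    rw [hfuel, sinkC]
    rw [if_neg ?_]
    swap
    · rw [List.getD_append_right _ _ _ _ (by omega),
          show u.length + 1 - u.length = 1 by omega]
      simp [List.replicate_succ]
    · have hget : (u ++ x :: (List.replicate (p+1) 'O' ++ kept)).getD u.length 'O' = x := by
        rw [List.getD_append_right _ _ _ _ (by omega), Nat.sub_self]
        rfl
      have hset : ((u ++ x :: (List.replicate (p+1) 'O' ++ kept)).set (u.length + 1)
            ((u ++ x :: (List.replicate (p+1) 'O' ++ kept)).getD u.length 'O')).set u.length 'O'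
          = (u ++ ['O']) ++ x :: (List.replicate p 'O' ++ kept) := by
        rw [hget]
        rw [List.set_append_right _ _ (by omega), List.set_append_right _ _ (by omega)]
        simp only [Nat.sub_self, show u.length + 1 - u.length = 1 by omega]
        simp [List.replicate_succ, List.set_cons_succ, List.set_cons_zero]
      rw [hset]
      have := ih (u ++ ['O']) kept x hx hk (by simp; omega)
      rw [show p + kept.length = M - 1 - (u ++ ['O']).length by simp; omega,
          show u.length + 1 = (u ++ ['O']).length by simp]
      rw [this]
      simp [List.replicate_succ]

theorem step_compact {M : Nat} (u tail : List Char) (x : Char)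
    (hlen : u.length + 1 + tail.length = M) (hlt : u.length + 1 < M) :
    stepC M (u ++ x :: compactSeg tail) u.length = u ++ compactSeg (x :: tail) := by
  have hflen := List.length_filter_le (fun c => decide (c ≠ 'O')) tail
  have hget0 : (u ++ x :: compactSeg tail).getD u.length 'O' = x := by
    rw [List.getD_append_right _ _ _ _ (by omega), Nat.sub_self]; rfl
  by_cases hx : x = 'O'
  · rw [stepC, if_neg (by rw [hget0]; simp [hx]), hx, compactSeg_cons_O]
  · set kept := tail.filter (· ≠ 'O') with hkept
    set pad := tail.length - kept.length with hpad
    rcases Nat.eq_zero_or_pos pad with hp0 | hppos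
    · -- no 'O' in the tail: the cell cannot fall
      have hall : ∀ a ∈ tail, decide (a ≠ 'O') = true := by
        apply List.length_filter_eq_length_iff.mp
        rw [← hkept]; omega
      have hfe : tail.filter (· ≠ 'O') = tail := List.filter_eq_self.mpr hall
      have hcs : compactSeg tail = tail := by
        simp only [compactSeg, hfe, Nat.sub_self]
        simp
      have htne : tail ≠ [] := by intro h; rw [h] at hlen; simp at hlen; omega
      obtain ⟨y, t', rfl⟩ := List.exists_cons_of_ne_nil htne
      have hy : y ≠ 'O' := by simpa using hall y (by simp)
      have hguard2 : (u ++ x :: (y :: t')).getD (u.length + 1) 'O' = y := by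
        rw [List.getD_append_right _ _ _ _ (by omega),
            show u.length + 1 - u.length = 1 by omega]
        simp
      rw [hcs, stepC, if_neg ?_, compactSeg_cons_ne _ hx, hfe, Nat.sub_self]
      · simp
      · rintro ⟨-, hc⟩
        rw [hguard2] at hc
        exact hy hc
    · -- the cell falls through 'pad' blanks
      have hcs : compactSeg tail = List.replicate pad 'O' ++ kept := rfl
      rw [stepC, if_pos ?_]
      · have hsl := sink_lemma (M := M) pad u kept x hx
          (fun y hy => by simpa using List.of_mem_filter hy) (by omega)
        rw [hcs, hsl, compactSeg_cons_ne _ hx, ← hkept, ← hpad]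
      · constructor
        · rw [hget0]; simpa using hx
        · rw [hcs, List.getD_append_right _ _ _ _ (by omega),
              show u.length + 1 - u.length = 1 by omega]
          cases hpc : pad with
          | zero => omega
          | succ q => simp [List.replicate_succ, List.getD_cons_succ]

theorem compactSeg_single (y : Char) : compactSeg [y] = [y] := by
  by_cases hy : y = 'O'
  · subst hy; simp [compactSeg]
  · simp [compactSeg, hy]

theorem grav_aux {M : Nat} : ∀ (t : Nat) (c : List Char), t ≤ M - 1 → c.length = M →
    (List.range t).foldl (fun c k => stepC M c (M - (k + 2))) c
      = c.take (M - 1 - t) ++ compactSeg (c.drop (M - 1 - t)) := by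
  intro t
  induction t with
  | zero =>
    intro c _ hc
    rcases Nat.eq_zero_or_pos M with hM | hM
    · subst hM
      have : c = [] := List.eq_nil_of_length_eq_zero hc
      subst this; simp [compactSeg]
    · have hlt : M - 1 < c.length := by omega
      have hdrop : c.drop (M - 1) = [c.getD (M - 1) 'O'] := by
        rw [List.drop_eq_getElem_cons hlt, List.drop_eq_nil_of_le (by omega),
            List.getD_eq_getElem c 'O' hlt]
      simp only [List.range_zero, List.foldl_nil, Nat.sub_zero, hdrop, compactSeg_single]
      rw [← hdrop, List.take_append_drop]
  | succ t ih =>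
    intro c ht hc
    have hM : t + 2 ≤ M := by omega
    have hr : M - (t + 2) = M - 1 - (t + 1) := by omega
    have hrlt : M - (t + 2) < c.length := by omega
    rw [List.range_succ, List.foldl_append, List.foldl_cons, List.foldl_nil,
        ih c (by omega) hc]
    have htake : c.take (M - 1 - t) = c.take (M - (t + 2)) ++ [c.getD (M - (t + 2)) 'O'] := by
      rw [show M - 1 - t = (M - (t + 2)) + 1 by omega, List.take_succ,
          List.getElem?_eq_getElem hrlt, List.getD_eq_getElem c 'O' hrlt]
      rfl
    have hdrop1 : c.drop (M - 1 - t) = c.drop ((M - (t + 2)) + 1) := by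
      rw [show M - 1 - t = (M - (t + 2)) + 1 by omega]
    have hdrop0 : c.drop (M - (t + 2)) = c.getD (M - (t + 2)) 'O' :: c.drop ((M - (t + 2)) + 1) := by
      rw [List.drop_eq_getElem_cons hrlt, List.getD_eq_getElem c 'O' hrlt]
    rw [htake, hdrop1, List.append_assoc, List.singleton_append]
    have hstep := step_compact (M := M) (c.take (M - (t + 2))) (c.drop ((M - (t + 2)) + 1))
      (c.getD (M - (t + 2)) 'O') (by simp [List.length_take, List.length_drop]; omega)
      (by simp [List.length_take]; omega)
    rw [show (c.take (M - (t + 2))).length = M - (t + 2) from by simp [List.length_take]; omega] at hstep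
    rw [hstep, ← hdrop0, hr]

theorem gravC_compact {M : Nat} (c : List Char) (hc : c.length = M) :
    gravC M c = compactSeg c := by
  rw [gravC, grav_aux (M - 1) c (le_refl _) hc, Nat.sub_self]
  simp


-- ---------- generic loop-shape / list lemmas ----------
theorem pvFoldl_congr {α β : Type} (l : List β) (f f' : α → β → α) (a : α)
    (h : ∀ acc x, f acc x = f' acc x) : l.foldl f a = l.foldl f' a := by
  induction l generalizing a with
  | nil => rfl
  | cons x t ih => simp only [List.foldl_cons, h]; exact ih _

theorem pvFoldl_if_append {β γ : Type} (p : β → Prop) [DecidablePred p] (f : β → List γ) :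
    ∀ (l : List β) (acc : List γ),
    l.foldl (fun acc x => if p x then acc ++ f x else acc) acc
      = acc ++ l.flatMap (fun x => if p x then f x else []) := by
  intro l
  induction l with
  | nil => intro acc; simp
  | cons x t ih =>
    intro acc
    simp only [List.foldl_cons, List.flatMap_cons]
    by_cases hx : p x
    · rw [if_pos hx, ih, if_pos hx, List.append_assoc]
    · rw [if_neg hx, ih, if_neg hx]; simp

theorem pvFilterMap_if_flatMap {β γ δ : Type} (p : β → Prop) [DecidablePred p]
    (f : β → γ) (h : γ → List δ) :
    ∀ (l : List β),
    (l.filterMap (fun x => if p x then some (f x) else none)).flatMap h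
      = l.flatMap (fun x => if p x then h (f x) else []) := by
  intro l
  induction l with
  | nil => simp
  | cons x t ih =>
    by_cases hx : p x
    · simp only [List.filterMap_cons, if_pos hx, List.flatMap_cons, ih]
    · simp only [List.filterMap_cons, if_neg hx, List.flatMap_cons, ih]
      simp

theorem pvFilterMap_if_eq_filter_map {β : Type} (p : Char → Prop) [DecidablePred p]
    (f : β → Char) :
    ∀ (l : List β),
    l.filterMap (fun x => if p (f x) then some (f x) else none)
      = (l.map f).filter (fun c => p c) := by
  intro l
  induction l with
  | nil => simp
  | cons x t ih =>
    by_cases hx : p (f x)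
    · simp only [List.filterMap_cons, if_pos hx, List.map_cons, List.filter_cons]
      rw [if_pos (by simpa using hx), ih]
    · simp only [List.filterMap_cons, if_neg hx, List.map_cons, List.filter_cons, ih]
      rw [if_neg (by simpa using hx)]

-- extensionality through pvGet
theorem pvListListExt (X Y : List (List Char)) (hlen : X.length = Y.length)
    (hrow : ∀ i, i < X.length → (X.getD i []).length = (Y.getD i []).length)
    (hentry : ∀ i j, pvGet X i j = pvGet Y i j) : X = Y := by
  apply List.ext_getElem hlen
  intro i h1 h2
  apply List.ext_getElem
    (by have := hrow i h1; rwa [pvGetD_eq_getElem X h1, pvGetD_eq_getElem Y (by omega)] at this)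
  intro j hj1 hj2
  have := hentry i j
  rwa [pvGet, pvGet, pvGetD_eq_getElem X h1, pvGetD_eq_getElem Y (by omega),
      List.getD_eq_getElem _ _ hj1, List.getD_eq_getElem _ _ hj2] at this

-- the map-over-ranges grid builder
theorem pvGet_mapRange (M N : Nat) (f : Nat → Nat → Char) (i j : Nat) :
    pvGet ((List.range M).map (fun i => (List.range N).map (fun j => f i j))) i j
      = if i < M ∧ j < N then f i j else 'O' := by
  by_cases hi : i < M
  · have hrow : ((List.range M).map (fun i => (List.range N).map (fun j => f i j))).getD i []
        = (List.range N).map (fun j => f i j) := by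
      rw [List.getD_eq_getElem _ _ (by simpa using hi), List.getElem_map, List.getElem_range]
    rw [pvGet, hrow]
    by_cases hj : j < N
    · rw [List.getD_eq_getElem _ _ (by simpa using hj), List.getElem_map, List.getElem_range,
          if_pos ⟨hi, hj⟩]
    · rw [List.getD_eq_default _ _ (by simpa using Nat.le_of_not_lt hj), if_neg (by tauto)]
  · have hrow : ((List.range M).map (fun i => (List.range N).map (fun j => f i j))).getD i []
        = [] := List.getD_eq_default _ _ (by simpa using Nat.le_of_not_lt hi)
    rw [pvGet, hrow, if_neg (by tauto)]
    rfl

theorem pvRectI_mapRange (M N : Nat) (f : Nat → Nat → Char) :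
    RectI M N ((List.range M).map (fun i => (List.range N).map (fun j => f i j))) := by
  refine ⟨by simp, fun i hi => ?_⟩
  rw [pvGetD_eq_getElem _ (by simpa using hi), List.getElem_map]
  simp

theorem pvGet_oob {M N : Nat} {g : List (List Char)} (hR : RectI M N g)
    {i j : Nat} (h : ¬ (i < M ∧ j < N)) : pvGet g i j = 'O' := by
  obtain ⟨h1, h2⟩ := hR
  by_cases hi : i < M
  · have hj : ¬ j < N := fun hj => h ⟨hi, hj⟩
    have hlen : (g.getD i []).length ≤ j := by rw [h2 i hi]; omega
    rw [pvGet, List.getD_eq_default _ _ hlen]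
  · have hlen : g.length ≤ i := by omega
    rw [pvGet, List.getD_eq_default _ _ hlen]
    rfl

theorem pvGet_ne_imp_bounds {g : List (List Char)} {i j : Nat}
    (h : pvGet g i j ≠ 'O') : i < g.length ∧ j < (g.getD i []).length := by
  constructor
  · by_contra hi
    apply h
    have hrow : g.getD i [] = [] := List.getD_eq_default _ _ (by omega)
    rw [pvGet, hrow]
    rfl
  · by_contra hj
    apply h
    rw [pvGet, List.getD_eq_default _ _ (by omega)]

-- ---------- detection ----------
def pvBlkAt (i j : Nat) : List (Nat × Nat) := [(i, j), (i+1, j), (i, j+1), (i+1, j+1)]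

abbrev pvCond (g : List (List Char)) (i j : Nat) : Prop :=
  pvGet g i j = pvGet g (i+1) j ∧ pvGet g (i+1) j = pvGet g i (j+1) ∧
  pvGet g i (j+1) = pvGet g (i+1) (j+1) ∧ pvGet g (i+1) (j+1) ≠ 'O'

theorem pvDetect_norm (g : List (List Char)) (m n : Int) :
    pvA_detect g m n = (List.range (m - 1).toNat).flatMap (fun i =>
      (List.range (n - 1).toNat).flatMap (fun j =>
        if pvCond g i j then pvBlkAt i j else [])) := by
  unfold pvA_detect
  refine Eq.trans (pvFoldl_congr _ _
    (fun acc i => acc ++ (List.range (n - 1).toNat).flatMap (fun j =>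
        if pvCond g i j then pvBlkAt i j else [])) _
    (fun acc i => pvFoldl_if_append (pvCond g i) (pvBlkAt i) _ acc)) ?_
  rw [PySem.List.foldl_append_eq_flatMap]
  simp

theorem pvHits_flat (g : List (List Char)) (m n : Int) :
    (pvB_hits g m n).flatMap pvB_blk = (List.range (m - 1).toNat).flatMap (fun i =>
      (List.range (n - 1).toNat).flatMap (fun j =>
        if pvCond g i j then pvBlkAt i j else [])) := by
  rw [pvB_hits, List.flatMap_assoc]
  have h : ∀ i : Nat,
      ((List.range (n - 1).toNat).filterMap (fun j =>
          if pvCond g i j then some (i, j) else none)).flatMap pvB_blk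
        = (List.range (n - 1).toNat).flatMap (fun j =>
          if pvCond g i j then pvBlkAt i j else []) :=
    fun i => pvFilterMap_if_flatMap (pvCond g i) (fun j => (i, j)) pvB_blk _
  simp only [h]

theorem pvDetect_eq_hits (g : List (List Char)) (m n : Int) :
    pvA_detect g m n = (pvB_hits g m n).flatMap pvB_blk := by
  rw [pvDetect_norm, pvHits_flat]

theorem pvDetect_mem {g : List (List Char)} {m n : Int} {p : Nat × Nat}
    (hp : p ∈ pvA_detect g m n) :
    pvGet g p.1 p.2 ≠ 'O' ∧ p.1 < m.toNat ∧ p.2 < n.toNat := by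
  rw [pvDetect_norm] at hp
  obtain ⟨i, hi, hp2⟩ := List.mem_flatMap.mp hp
  obtain ⟨j, hj, hp3⟩ := List.mem_flatMap.mp hp2
  rw [List.mem_range] at hi hj
  have hiM : i + 1 < m.toNat := by omega
  have hjN : j + 1 < n.toNat := by omega
  split_ifs at hp3 with hc
  · obtain ⟨c1, c2, c3, c4⟩ := hc
    rcases List.mem_cons.mp hp3 with rfl | hp4
    · exact ⟨by simp only; rw [c1, c2, c3]; exact c4, by simp; omega, by simp; omega⟩
    rcases List.mem_cons.mp hp4 with rfl | hp5
    · exact ⟨by simp only; rw [c2, c3]; exact c4, by simp; omega, by simp; omega⟩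
    rcases List.mem_cons.mp hp5 with rfl | hp6
    · exact ⟨by simp only; rw [c3]; exact c4, by simp; omega, by simp; omega⟩
    rcases List.mem_cons.mp hp6 with rfl | hp7
    · exact ⟨c4, by simp; omega, by simp; omega⟩
    · simp at hp7
  · simp at hp3


-- ---------- marking ----------
theorem pvMark_cons (g : List (List Char)) (p : Nat × Nat) (rest : List (Nat × Nat)) (ans : Int) :
    pvA_mark g (p :: rest) ans
      = if pvGet g p.1 p.2 ≠ 'O' then pvA_mark (pvSet g p.1 p.2 'O') rest (ans + 1)
        else pvA_mark g rest ans := by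
  have h0 : pvA_mark g (p :: rest) ans
      = List.foldl (fun p pr =>
          if pvGet p.1 pr.1 pr.2 ≠ 'O' then (pvSet p.1 pr.1 pr.2 'O', p.2 + 1) else p)
        (if pvGet g p.1 p.2 ≠ 'O' then (pvSet g p.1 p.2 'O', ans + 1) else (g, ans)) rest := rfl
  rw [h0]
  split_ifs with h
  · rfl
  · rfl

theorem pvMark_nil (g : List (List Char)) (ans : Int) : pvA_mark g [] ans = (g, ans) := rfl

theorem pvGet_mark_self {g : List (List Char)} {i j : Nat} (h : pvGet g i j ≠ 'O') :
    pvGet (pvSet g i j 'O') i j = 'O' := by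
  obtain ⟨h1, h2⟩ := pvGet_ne_imp_bounds h
  rw [pvGet_pvSet, if_pos ⟨rfl, rfl, h1, h2⟩]

theorem pvGet_mark_ne {g : List (List Char)} {p q : Nat × Nat} (h : p ≠ q) (c : Char) :
    pvGet (pvSet g p.1 p.2 c) q.1 q.2 = pvGet g q.1 q.2 := by
  rw [pvGet_pvSet, if_neg]
  rintro ⟨e1, e2, -⟩
  exact h (Prod.ext_iff.mpr ⟨e1, e2⟩)

theorem pvMark_fst_get : ∀ (l : List (Nat × Nat)) (g : List (List Char)) (ans : Int) (i j : Nat),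
    pvGet (pvA_mark g l ans).1 i j = if (i, j) ∈ l then 'O' else pvGet g i j := by
  intro l
  induction l with
  | nil => intro g ans i j; simp [pvMark_nil]
  | cons p rest ih =>
    obtain ⟨pi, pj⟩ := p
    intro g ans i j
    rw [pvMark_cons]
    dsimp only
    rcases eq_or_ne (i, j) (pi, pj) with he | hne
    · obtain ⟨h1, h2⟩ := Prod.ext_iff.mp he
      dsimp only at h1 h2
      subst h1; subst h2
      rw [if_pos (List.mem_cons_self)]
      split_ifs with hg
      · rw [ih]
        by_cases hr : (i, j) ∈ rest
        · rw [if_pos hr]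
        · rw [if_neg hr]; exact pvGet_mark_self hg
      · rw [ih]
        by_cases hr : (i, j) ∈ rest
        · rw [if_pos hr]
        · rw [if_neg hr]; exact not_not.mp hg
    · have hset : ∀ c : Char, pvGet (pvSet g pi pj c) i j = pvGet g i j := fun c =>
        pvGet_mark_ne (p := (pi, pj)) (q := (i, j)) (Ne.symm hne) c
      have hmem : ((i, j) ∈ (pi, pj) :: rest) ↔ ((i, j) ∈ rest) := by
        rw [List.mem_cons]; exact or_iff_right hne
      by_cases hr : (i, j) ∈ rest
      · rw [if_pos (hmem.mpr hr)]
        split_ifs with hg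
        · rw [ih, if_pos hr]
        · rw [ih, if_pos hr]
      · rw [if_neg (fun hmm => hr (hmem.mp hmm))]
        split_ifs with hg
        · rw [ih, if_neg hr]
          exact hset 'O'
        · rw [ih, if_neg hr]

theorem pvMark_RectI {M N : Nat} : ∀ (l : List (Nat × Nat)) (g : List (List Char)) (ans : Int),
    RectI M N g → RectI M N (pvA_mark g l ans).1 := by
  intro l
  induction l with
  | nil => intro g ans h; simpa [pvMark_nil] using h
  | cons p rest ih =>
    intro g ans h
    rw [pvMark_cons]
    split_ifs with hg
    · exact ih _ _ (RectI_pvSet h _ _ _)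
    · exact ih _ _ h

theorem pvMark_snd : ∀ (l : List (Nat × Nat)) (g : List (List Char)) (ans : Int),
    (pvA_mark g l ans).2
      = ans + ((l.toFinset.filter (fun p => pvGet g p.1 p.2 ≠ 'O')).card : Int) := by
  intro l
  induction l with
  | nil => intro g ans; simp [pvMark_nil]
  | cons p rest ih =>
    intro g ans
    rw [pvMark_cons, List.toFinset_cons, Finset.filter_insert]
    split_ifs with hg
    · rw [ih]
      have hP1 : ∀ q ∈ rest.toFinset,
          (pvGet (pvSet g p.1 p.2 'O') q.1 q.2 ≠ 'O') ↔ (q ≠ p ∧ pvGet g q.1 q.2 ≠ 'O') := by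
        intro q _
        rcases eq_or_ne q p with rfl | hq
        · simp [pvGet_mark_self hg]
        · rw [pvGet_mark_ne (Ne.symm hq) 'O']
          simp [hq]
      rw [Finset.filter_congr hP1]
      have hsplit : rest.toFinset.filter (fun q => q ≠ p ∧ pvGet g q.1 q.2 ≠ 'O')
          = (rest.toFinset.filter (fun q => pvGet g q.1 q.2 ≠ 'O')).erase p := by
        ext q
        simp only [Finset.mem_filter, Finset.mem_erase]
        tauto
      rw [hsplit]
      have hins : insert p (rest.toFinset.filter (fun q => pvGet g q.1 q.2 ≠ 'O'))
          = insert p ((rest.toFinset.filter (fun q => pvGet g q.1 q.2 ≠ 'O')).erase p) := by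
        ext q
        simp only [Finset.mem_insert, Finset.mem_erase]
        tauto
      rw [hins, Finset.card_insert_of_notMem (Finset.notMem_erase _ _)]
      push_cast
      ring
    · rw [ih]

-- Python's len(doomed): the distinct cells, counted via the same Finset
theorem pvOfList_len {g : List (List Char)} (l : List (Nat × Nat))
    (h : ∀ p ∈ l, pvGet g p.1 p.2 ≠ 'O') :
    ((PySem.Set.ofList l).length : Int)
      = ((l.toFinset.filter (fun p => pvGet g p.1 p.2 ≠ 'O')).card : Int) := by
  rw [Finset.filter_true_of_mem (fun p hp => h p (List.mem_toFinset.mp hp))]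
  have h1 : (PySem.Set.ofList l).toFinset = l.toFinset := by
    ext q
    simp [List.mem_toFinset, PySem.Set.mem_ofList]
  rw [← h1, List.toFinset_card_of_nodup (PySem.Set.nodup_ofList _)]

theorem pvFlatMap_blk_nil_iff (hits : List (Nat × Nat)) :
    hits.flatMap pvB_blk = [] ↔ hits = [] := by
  cases hits with
  | nil => simp
  | cons p t => simp [pvB_blk]


-- ---------- B's round, named pieces (all rfl-equal to the let-chain in pvB_step) ----------
def pvCleared (g : List (List Char)) (m n : Int) (hits : List (Nat × Nat)) : List (List Char) :=
  (List.range m.toNat).map (fun i => (List.range n.toNat).map (fun j =>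
    if PySem.Set.contains (PySem.Set.ofList (hits.flatMap pvB_blk)) (i, j) then 'O'
    else pvGet g i j))

def pvKeptOf (X : List (List Char)) (m n : Int) : List (List Char) :=
  (List.range n.toNat).map (fun j =>
    (List.range m.toNat).filterMap (fun i =>
      if pvGet X i j ≠ 'O' then some (pvGet X i j) else none))

def pvRebuild (m n : Int) (kept : List (List Char)) : List (List Char) :=
  (List.range m.toNat).map (fun i => (List.range n.toNat).map (fun j =>
    if i < m.toNat - (kept.getD j []).length then 'O'
    else (kept.getD j []).getD (i - (m.toNat - (kept.getD j []).length)) 'O'))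

theorem pvB_step_fst (g : List (List Char)) (m n : Int) (hits : List (Nat × Nat)) :
    (pvB_step g m n hits).1 = pvRebuild m n (pvKeptOf (pvCleared g m n hits) m n) := rfl

theorem pvB_step_snd (g : List (List Char)) (m n : Int) (hits : List (Nat × Nat)) :
    (pvB_step g m n hits).2
      = ((PySem.Set.ofList (hits.flatMap pvB_blk)).length : Int) := rfl

theorem pvToNat_sub_one (m : Int) : (m - 1).toNat = m.toNat - 1 := by omega

-- cleared board = A's marked board
theorem pvCleared_eq {m n : Int} {g : List (List Char)}
    (hR : RectI m.toNat n.toNat g) (ans : Int) :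
    pvCleared g m n (pvB_hits g m n) = (pvA_mark g (pvA_detect g m n) ans).1 := by
  have hRm := pvMark_RectI (pvA_detect g m n) g ans hR
  apply pvListListExt
  · simp [pvCleared, hRm.1]
  · intro i hi
    have hiM : i < m.toNat := by simpa [pvCleared] using hi
    have h1 : ((pvCleared g m n (pvB_hits g m n)).getD i []).length = n.toNat := by
      rw [pvCleared, List.getD_eq_getElem _ _ (by simpa using hiM), List.getElem_map]
      simp
    rw [h1, hRm.2 i hiM]
  · intro i j
    rw [pvCleared, pvGet_mapRange, pvMark_fst_get]
    have hmem : (PySem.Set.contains (PySem.Set.ofList ((pvB_hits g m n).flatMap pvB_blk)) (i, j)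
        = true) ↔ (i, j) ∈ pvA_detect g m n := by
      rw [PySem.Set.contains_iff, PySem.Set.mem_ofList, pvDetect_eq_hits]
    by_cases hin : i < m.toNat ∧ j < n.toNat
    · rw [if_pos hin]
      by_cases hc : (i, j) ∈ pvA_detect g m n
      · rw [if_pos (hmem.mpr hc), if_pos hc]
      · rw [if_neg (fun hb => hc (hmem.mp hb)), if_neg hc]
    · rw [if_neg hin]
      by_cases hc : (i, j) ∈ pvA_detect g m n
      · rw [if_pos hc]
      · rw [if_neg hc, pvGet_oob hR hin]

-- kept column j = the non-'O' cells of column j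
theorem pvKeptOf_getD {m n : Int} {X : List (List Char)}
    (hR : RectI m.toNat n.toNat X) {j : Nat} (hj : j < n.toNat) :
    (pvKeptOf X m n).getD j [] = (pvCol X j).filter (· ≠ 'O') := by
  rw [pvKeptOf, List.getD_eq_getElem _ _ (by simpa using hj), List.getElem_map,
      List.getElem_range]
  rw [pvFilterMap_if_eq_filter_map (fun c => c ≠ 'O') (fun i => pvGet X i j)]
  have hcol : (List.range m.toNat).map (fun i => pvGet X i j) = pvCol X j := by
    apply List.ext_getElem (by simp [pvCol, hR.1])
    intro k h1 h2
    rw [List.getElem_map, List.getElem_range, pvGet_col,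
        List.getD_eq_getElem _ _ (by simpa using h2)]
  rw [hcol]

theorem pvCompactSeg_getD (c : List Char) (i : Nat) :
    (compactSeg c).getD i 'O'
      = if i < c.length - (c.filter (· ≠ 'O')).length then 'O'
        else (c.filter (· ≠ 'O')).getD (i - (c.length - (c.filter (· ≠ 'O')).length)) 'O' := by
  by_cases hi : i < c.length - (c.filter (· ≠ 'O')).length
  · rw [if_pos hi, compactSeg, List.getD_append _ _ _ _ (by simpa using hi),
        List.getD_eq_getElem _ _ (by simpa using hi), List.getElem_replicate]
  · rw [if_neg hi, compactSeg]
    have hlr : (List.replicate (c.length - (c.filter (· ≠ 'O')).length) 'O').length ≤ i := by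
      rw [List.length_replicate]; omega
    rw [List.getD_append_right _ _ _ _ hlr, List.length_replicate]

-- A's gravity pass = B's rebuild
theorem pvGrav_rebuild {m n : Int} {X : List (List Char)}
    (hR : RectI m.toNat n.toNat X) :
    pvA_grav X m n = pvRebuild m n (pvKeptOf X m n) := by
  have hgrav : pvA_grav X m n
      = (List.range (m - 1).toNat).foldl (fun g k =>
          (List.range n.toNat).foldl (stepAt m.toNat (m.toNat - (k + 2))) g) X := rfl
  have hks : ∀ k ∈ List.range (m - 1).toNat, k + 2 ≤ m.toNat := by
    intro k hk
    rw [List.mem_range, pvToNat_sub_one] at hk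
    omega
  obtain ⟨o1, o2⟩ := outer_col (List.range (m - 1).toNat) X hks hR
  have hflen : ∀ j, ((pvCol X j).filter (· ≠ 'O')).length ≤ m.toNat := by
    intro j
    calc ((pvCol X j).filter (· ≠ 'O')).length ≤ (pvCol X j).length :=
          List.length_filter_le _ _
      _ = m.toNat := by rw [length_pvCol, hR.1]
  apply pvListListExt
  · rw [hgrav, o2.1]
    simp [pvRebuild]
  · intro i hi
    rw [hgrav] at hi
    have hiM : i < m.toNat := by have := o2.1; omega
    have h1 : ((pvA_grav X m n).getD i []).length = n.toNat := by
      rw [hgrav]; exact o2.2 i hiM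
    have h2 : ((pvRebuild m n (pvKeptOf X m n)).getD i []).length = n.toNat := by
      rw [pvRebuild, List.getD_eq_getElem _ _ (by simpa using hiM), List.getElem_map]
      simp
    rw [hgrav] at h1 ⊢
    rw [h1, h2]
  · intro i j
    by_cases hj : j < n.toNat
    · have hcolL : (pvCol X j).length = m.toNat := by rw [length_pvCol, hR.1]
      have hcg : pvCol (pvA_grav X m n) j = compactSeg (pvCol X j) := by
        rw [hgrav, o1 j hj, ← gravC_compact (M := m.toNat) (pvCol X j) hcolL, gravC,
            pvToNat_sub_one]
      rw [pvGet_col, hcg, pvCompactSeg_getD, hcolL]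
      rw [pvRebuild, pvGet_mapRange, pvKeptOf_getD hR hj]
      by_cases hiM : i < m.toNat
      · rw [if_pos (show i < m.toNat ∧ j < n.toNat from ⟨hiM, hj⟩)]
      · rw [if_neg (show ¬ (i < m.toNat ∧ j < n.toNat) from fun h => hiM h.1)]
        have h1 : ¬ i < m.toNat - ((pvCol X j).filter (· ≠ 'O')).length := by
          have := hflen j; omega
        rw [if_neg h1, List.getD_eq_default _ _ (by have := hflen j; omega)]
    · have hRg : RectI m.toNat n.toNat (pvA_grav X m n) := by rw [hgrav]; exact o2
      rw [pvGet_oob hRg (by tauto), pvRebuild, pvGet_mapRange, if_neg (by tauto)]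


-- ---------- the outer while-loops agree round for round ----------
theorem pvLoop_eq {m n : Int} : ∀ (fuel : Nat) (g : List (List Char)) (ans : Int),
    RectI m.toNat n.toNat g → pvA_loop fuel g m n ans = pvB_loop fuel g m n ans := by
  intro fuel
  induction fuel with
  | zero => intro g ans _; rfl
  | succ fuel ih =>
    intro g ans hR
    dsimp only [pvA_loop, pvB_loop]
    by_cases hh : pvB_hits g m n = []
    · have hl : pvA_detect g m n = [] := by
        rw [pvDetect_eq_hits, hh]
        rfl
      rw [hl, hh, if_pos (show ([] : List (Nat × Nat)).length = 0 from rfl),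
          if_pos rfl, pvMark_nil]
    · have hlne : ¬ (pvA_detect g m n).length = 0 := by
        rw [pvDetect_eq_hits]
        intro h0
        exact hh ((pvFlatMap_blk_nil_iff _).mp (List.length_eq_zero_iff.mp h0))
      rw [if_neg hlne, if_neg hh]
      have hcl : pvCleared g m n (pvB_hits g m n)
          = (pvA_mark g (pvA_detect g m n) ans).1 := pvCleared_eq hR ans
      have hRm : RectI m.toNat n.toNat (pvA_mark g (pvA_detect g m n) ans).1 :=
        pvMark_RectI _ g ans hR
      have hsnd : (pvA_mark g (pvA_detect g m n) ans).2
          = ans + (pvB_step g m n (pvB_hits g m n)).2 := by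
        rw [pvB_step_snd, ← pvDetect_eq_hits, pvMark_snd,
            pvOfList_len (pvA_detect g m n) (fun p hp => (pvDetect_mem hp).1)]
      have hfst : pvA_grav (pvA_mark g (pvA_detect g m n) ans).1 m n
          = (pvB_step g m n (pvB_hits g m n)).1 := by
        rw [pvB_step_fst, hcl, pvGrav_rebuild hRm]
      have hRnew : RectI m.toNat n.toNat (pvB_step g m n (pvB_hits g m n)).1 := by
        rw [pvB_step_fst]
        exact pvRectI_mapRange _ _ _
      rw [hsnd, hfst]
      exact ih _ _ hRnew

theorem solution_spec : Claim_equal_solution := by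
  intro m n board hDom hPre
  show solution m n board = solution_alt m n board
  dsimp only [solution, solution_alt]
  have hinner : ∀ i : Nat,
      (List.range n.toNat).foldl (fun row j => row ++ [(board.getD i "").toList.getD j 'O']) []
        = (List.range n.toNat).map (fun j => (board.getD i "").toList.getD j 'O') := by
    intro i
    rw [PySem.List.foldl_append_singleton_eq_map]
    simp
  have hconv : (List.range m.toNat).foldl (fun acc i =>
        acc ++ [(List.range n.toNat).foldl (fun row j =>
          row ++ [(board.getD i "").toList.getD j 'O']) []]) []
      = (List.range m.toNat).map (fun i =>
          (List.range n.toNat).map (fun j => (board.getD i "").toList.getD j 'O')) := by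
    rw [PySem.List.foldl_append_singleton_eq_map]
    simp only [List.nil_append]
    exact List.map_congr_left (fun i _ => hinner i)
  rw [hconv]
  exact pvLoop_eq _ _ _ (pvRectI_mapRange _ _ _)
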